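-- pv_equiv track=rewrite | github.com/pypi-data/pypi-mirror-365 | packages/personnel_matching_data_process_algo_v2/personnel_matching_data_process_algo_v2-0.0.1b8.tar.gz/personnel_matching_data_process_algo_v2-0.0.1b8/src/auto_teacher_process/utils/name_utils.py | add_abbreviations_point
-- ===== SOURCE A (Python) =====
-- import itertools
--
-- def add_abbreviations_point(name_variants):
--     new_variants = set(name_variants)  # 初始化结果集合，保留输入的原始值
--
--     for variant in name_variants:
--         words = variant.split(" ")  # 将字符串按空格分隔为单词列表
--         n = len(words)
--
--         # 保留原始输入形式
--         new_variants.add(variant)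
--
--         if n == 1:  # 如果只有一个单词
--             new_variants.add(words[0][0] + ".")  # 直接缩写为首字母加点
--         else:
--             # 遍历单词全写的组合情况（包括所有单词缩写）
--             for r in range(n + 1):  # r 表示全写单词的数量（包括全缩写 r=0）
--                 for full_indices in itertools.combinations(range(n), r):  # 选择 r 个单词全写
--                     abbreviated_variant = [
--                         word if j in full_indices else word[0] + "." for j, word in enumerate(words)
--                     ]
--                     new_variants.add(" ".join(abbreviated_variant))
--
--             # 处理相邻多个缩写连在一起的变体
--             for r in range(2, n + 1):  # 至少两个单词的组合
--                 for start_index in range(n - r + 1):  # 起始位置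
--                     # 检查组合中的单词是否都能缩写
--                     if all(len(words[start_index + i]) > 1 for i in range(r)):  # 确保长度 > 1 的单词
--                         abbreviated_variant = [
--                             words[start_index + i][0] + "." for i in range(r)
--                         ]  # 缩写相邻的 r 个单词
--                         merged_abbreviation = "".join(abbreviated_variant)  # 合并缩写单词
--                         # 构建新的变体
--                         new_variant = (
--                             " ".join(words[:start_index])  # 前部分
--                             + (" " + merged_abbreviation if merged_abbreviation else "")  # 连在一起的缩写
--                             + " "
--                             + " ".join(words[start_index + r :])  # 后部分
--                         ).strip()  # 去掉多余空格
--                         new_variants.add(new_variant)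
--
--     return new_variants
-- ===== SOURCE B (Python) =====
-- def add_abbreviations_point(name_variants):
--     new_variants = set(name_variants)
--
--     for variant in name_variants:
--         words = variant.split(" ")
--         n = len(words)
--
--         # all full/abbreviated mixtures, generated recursively (r full words, r = 0..n);
--         # this also covers the single-word case and the original variant itself
--         for r in range(n + 1):
--             for form in _forms(words, r):
--                 new_variants.add(" ".join(form))
--
--         # adjacent-merge variants: a prefix-sum table answers "is every word in the
--         # window longer than 1 char" without re-scanning the window
--         pref = [0]
--         for w in words:
--             pref.append(pref[-1] + (1 if len(w) > 1 else 0))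
--         for r in range(2, n + 1):
--             for start in range(n - r + 1):
--                 if pref[start + r] - pref[start] == r:
--                     merged = "".join(w[0] + "." for w in words[start:start + r])
--                     new_variants.add(
--                         (" ".join(words[:start]) + " " + merged + " "
--                          + " ".join(words[start + r:])).strip()
--                     )
--
--     return new_variants
--
--
-- def _forms(words, r):
--     """All ways to keep exactly r of the words full and abbreviate the rest,
--     in lexicographic order of the set of full positions."""
--     if not words:
--         return [[]] if r == 0 else []
--     head, tail = words[0], words[1:]
--     out = []
--     if r > 0:
--         out.extend([head] + t for t in _forms(tail, r - 1))
--     out.extend([head[0] + "."] + t for t in _forms(tail, r))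
--     return out
-- ===== Notes on version B (the rewrite author's own statement) =====
-- stated objective: alternative
-- what changed: The mixture variants are produced by a recursive generator over the word list instead of enumerating index combinations and testing 'j in full_indices' per word (the single-word case folds into it), and the adjacent-merge window check 'all(len(w)>1)' is answered from a prefix-sum table instead of re-scanning each window.
import Mathlib
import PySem

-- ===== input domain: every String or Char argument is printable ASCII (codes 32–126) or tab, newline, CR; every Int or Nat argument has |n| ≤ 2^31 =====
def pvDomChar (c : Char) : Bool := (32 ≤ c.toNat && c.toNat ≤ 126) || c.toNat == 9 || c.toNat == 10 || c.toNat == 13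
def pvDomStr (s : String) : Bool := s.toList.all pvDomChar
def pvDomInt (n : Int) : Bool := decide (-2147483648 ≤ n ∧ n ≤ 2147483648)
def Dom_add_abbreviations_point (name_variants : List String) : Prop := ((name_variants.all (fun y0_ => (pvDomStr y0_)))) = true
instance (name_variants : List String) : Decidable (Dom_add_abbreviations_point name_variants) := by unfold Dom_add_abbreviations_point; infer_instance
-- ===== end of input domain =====

-- B replaces A's index-combinations + membership-test enumeration of abbreviation mixtures by a
-- recursive generator and the adjacent-merge window's all()-rescan by a prefix-sum table (alternative
-- decomposition, same results); A raises IndexError on variants with an empty split word, excluded by Pre_.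


-- ===== PORT A =====
-- word[0] + "." : '.take 1' is exact for nonempty word (Pre_ excludes empty split words, where Python raises IndexError)
def pvAbbr (w : String) : String := String.ofList (w.toList.take 1 ++ ['.'])
-- variant.split(" ") : sep ≠ "", so split? is always 'some' and getD [] is exact
def pvSplitWords (v : String) : List String := (PySem.Str.split? v " ").getD []

-- loop body of A's 'for variant in name_variants'
def pvStepA (nv : PySem.Set String) (variant : String) : PySem.Set String :=
  let words := pvSplitWords variant
  let n := words.length
  let nv := PySem.Set.add nv variant
  if n == 1 then
    PySem.Set.add nv (pvAbbr (PySem.List.pyGetD words 0 ""))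
  else
    let nv := (PySem.List.pyRange 0 ((n : Int) + 1) 1).foldl (fun nv r =>
      (PySem.List.combinations (PySem.List.pyRange 0 (n : Int) 1) r.toNat).foldl (fun nv full_indices =>
        PySem.Set.add nv (PySem.Str.join " "
          ((PySem.List.enumerate words).map (fun jw =>
            if full_indices.contains jw.1 then jw.2 else pvAbbr jw.2)))) nv) nv
    (PySem.List.pyRange 2 ((n : Int) + 1) 1).foldl (fun nv r =>
      (PySem.List.pyRange 0 ((n : Int) - r + 1) 1).foldl (fun nv start =>
        if (PySem.List.pyRange 0 r 1).all
            (fun i => decide (1 < PySem.Str.len (PySem.List.pyGetD words (start + i) ""))) then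
          let merged := PySem.Str.join ""
            ((PySem.List.pyRange 0 r 1).map (fun i => pvAbbr (PySem.List.pyGetD words (start + i) "")))
          PySem.Set.add nv (PySem.Str.strip
            (PySem.Str.join " " (PySem.List.slice words none (some start))
              ++ (if merged ≠ "" then " " ++ merged else "")
              ++ " "
              ++ PySem.Str.join " " (PySem.List.slice words (some (start + r)) none)))
        else nv) nv) nv

def add_abbreviations_point (name_variants : List String) : List String :=
  name_variants.foldl pvStepA (PySem.Set.ofList name_variants)

-- ===== PORT B =====
-- _forms(words, r): all ways to keep exactly r words full, abbreviating the rest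
def pvForms : List String → Nat → List (List String)
  | [], 0 => [[]]
  | [], _ + 1 => []
  | w :: ws, r =>
      (if r > 0 then (pvForms ws (r - 1)).map (fun t => w :: t) else [])
        ++ (pvForms ws r).map (fun t => pvAbbr w :: t)

-- loop body of B's 'for variant in name_variants'
def pvStepB (nv : PySem.Set String) (variant : String) : PySem.Set String :=
  let words := pvSplitWords variant
  let n := words.length
  let nv := (PySem.List.pyRange 0 ((n : Int) + 1) 1).foldl (fun nv r =>
    (pvForms words r.toNat).foldl (fun nv form =>
      PySem.Set.add nv (PySem.Str.join " " form)) nv) nv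
  let pref := words.foldl (fun p w =>
    p ++ [PySem.List.pyGetD p (-1) 0 + (if 1 < PySem.Str.len w then (1 : Int) else 0)]) [(0 : Int)]
  (PySem.List.pyRange 2 ((n : Int) + 1) 1).foldl (fun nv r =>
    (PySem.List.pyRange 0 ((n : Int) - r + 1) 1).foldl (fun nv start =>
      if PySem.List.pyGetD pref (start + r) 0 - PySem.List.pyGetD pref start 0 == r then
        PySem.Set.add nv (PySem.Str.strip
          (PySem.Str.join " " (PySem.List.slice words none (some start))
            ++ " "
            ++ PySem.Str.join "" ((PySem.List.slice words (some start) (some (start + r))).map pvAbbr)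
            ++ " "
            ++ PySem.Str.join " " (PySem.List.slice words (some (start + r)) none)))
      else nv) nv) nv

def add_abbreviations_point_alt (name_variants : List String) : List String :=
  name_variants.foldl pvStepB (PySem.Set.ofList name_variants)

-- ===== PRECONDITION & SPEC =====
-- Pre_ excludes exactly the inputs where A raises IndexError: a variant one of whose space-split
-- words is empty (empty variant, leading/trailing/double space) makes A evaluate word[0] on "".
def Pre_add_abbreviations_point (name_variants : List String) : Prop :=
  ∀ v ∈ name_variants, ∀ w ∈ (PySem.Str.split? v " ").getD [], w ≠ ""
instance (name_variants : List String) : Decidable (Pre_add_abbreviations_point name_variants) := by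
  unfold Pre_add_abbreviations_point; infer_instance
def pvWitness_add_abbreviations_point : List String := ["john ronald reuel tolkien", "a"]
def Spec_add_abbreviations_point (name_variants : List String) (out : List String) : Prop :=
  out = add_abbreviations_point_alt name_variants
instance (name_variants : List String) (out : List String) :
    Decidable (Spec_add_abbreviations_point name_variants out) := by
  unfold Spec_add_abbreviations_point; infer_instance

-- ===== CLAIM (what is proved, stated in full; the proofs are below) =====
def Claim_equal_add_abbreviations_point : Prop :=
  ∀ (name_variants : List String), Dom_add_abbreviations_point name_variants →
    Pre_add_abbreviations_point name_variants →
      Spec_add_abbreviations_point name_variants (add_abbreviations_point name_variants)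

-- ===== LEMMAS AND PROOFS =====

-- Set.add of an element already present is a no-op
theorem pv_set_add_mem {s : PySem.Set String} {x : String} (h : x ∈ s) : s.add x = s := by
  simp [PySem.Set.add, PySem.Set.contains, h]

-- membership survives a fold whose step only grows the set
theorem pv_mem_foldl_of_grow {β : Type} (f : PySem.Set String → β → PySem.Set String)
    (hf : ∀ s b x, x ∈ s → x ∈ f s b) (l : List β) (s : PySem.Set String) (x : String)
    (hx : x ∈ s) : x ∈ l.foldl f s := by
  induction l generalizing s with
  | nil => exact hx
  | cons b t ih => exact ih _ (hf _ _ _ hx)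

theorem pv_mem_stepB (s : PySem.Set String) (v x : String) (hx : x ∈ s) : x ∈ pvStepB s v := by
  unfold pvStepB
  apply pv_mem_foldl_of_grow
  · intro s' b x' hx'
    apply pv_mem_foldl_of_grow
    · intro s'' b' x'' hx''
      split
      · exact (PySem.Set.mem_add _ _ _).mpr (Or.inl hx'')
      · exact hx''
    · exact hx'
  · apply pv_mem_foldl_of_grow
    · intro s' b x' hx'
      apply pv_mem_foldl_of_grow
      · intro s'' b' x'' hx''
        exact (PySem.Set.mem_add _ _ _).mpr (Or.inl hx'')
      · exact hx'
    · exact hx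

-- splitOn.go produces at least acc.length + 1 pieces
theorem pv_go_len (sep : List Char) : ∀ (fuel : Nat) (l cur : List Char) (acc : List (List Char)),
    acc.length + 1 ≤ (PySem.Chars.splitOn.go sep fuel l cur acc).length := by
  intro fuel
  induction fuel with
  | zero => intro l cur acc; simp [PySem.Chars.splitOn.go]
  | succ n ih =>
    intro l cur acc
    cases l with
    | nil => simp [PySem.Chars.splitOn.go]
    | cons c rest =>
      rw [PySem.Chars.splitOn.go]
      split
      · exact le_trans (by simp) (ih _ _ _)
      · exact ih _ _ _

theorem pv_go_singleton (sep : List Char) : ∀ (fuel : Nat) (l cur w : List Char),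
    PySem.Chars.splitOn.go sep fuel l cur [] = [w] → w = cur.reverse ++ l := by
  intro fuel
  induction fuel with
  | zero =>
    intro l cur w h
    simp [PySem.Chars.splitOn.go] at h
    exact h.symm
  | succ n ih =>
    intro l cur w h
    cases l with
    | nil => simp [PySem.Chars.splitOn.go] at h; simp [h]
    | cons c rest =>
      rw [PySem.Chars.splitOn.go] at h
      split at h
      · have := pv_go_len sep n (List.drop sep.length (c :: rest)) [] [cur.reverse]
        rw [h] at this; simp at this
      · have := ih _ _ _ h
        simpa using this

-- a one-word split returns the string itself
theorem pv_split_singleton (v w : String) (h : pvSplitWords v = [w]) : v = w := by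
  rw [pvSplitWords] at h
  simp only [PySem.Str.split?, PySem.Chars.split?] at h
  have hsep : (" ".toList.isEmpty) = false := by decide
  rw [hsep] at h
  simp only [if_neg Bool.false_ne_true, Option.map_some, Option.getD_some] at h
  rw [PySem.Chars.splitOn] at h
  rcases List.map_eq_singleton_iff.mp h with ⟨cs, hcs, hw⟩
  have := pv_go_singleton " ".toList _ _ _ _ hcs
  simp at this
  rw [← hw, this, String.ofList_toList]

-- B's recursive generator = A's combinations-of-full-indices enumeration (any index offset)
theorem pvForms_eq (ws : List String) : ∀ (r : Nat) (s : Int),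
    pvForms ws r = (PySem.List.combinations (PySem.List.pyRange s (s + ws.length) 1) r).map
      (fun full_indices => (PySem.List.enumerate ws s).map (fun jw =>
        if full_indices.contains jw.1 then jw.2 else pvAbbr jw.2)) := by
  induction ws with
  | nil =>
    intro r s
    simp only [List.length_nil, Int.natCast_zero, add_zero]
    rw [PySem.List.pyRange_one_eq_nil le_rfl]
    cases r with
    | zero => simp [pvForms, PySem.List.combinations_zero, PySem.List.enumerate]
    | succ n => simp [pvForms, PySem.List.combinations_nil_succ]
  | cons w t ih =>
    intro r s
    have hcons : PySem.List.pyRange s (s + ((w :: t).length : Int)) 1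
        = s :: PySem.List.pyRange (s + 1) ((s + 1) + (t.length : Int)) 1 := by
      rw [show s + ((w :: t).length : Int) = (s + 1) + (t.length : Int) by
            simp only [List.length_cons]; push_cast; ring,
          PySem.List.pyRange_one_cons (by omega)]
    have htail : ∀ idxs : List Int, idxs.Sublist (PySem.List.pyRange (s + 1) ((s + 1) + t.length) 1) →
        (PySem.List.enumerate t (s + 1)).map (fun jw =>
          if (s :: idxs).contains jw.1 then jw.2 else pvAbbr jw.2)
        = (PySem.List.enumerate t (s + 1)).map (fun jw =>
          if idxs.contains jw.1 then jw.2 else pvAbbr jw.2) := by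
      intro idxs hsub
      apply List.map_congr_left
      intro jw hjw
      rcases (PySem.List.mem_enumerate_iff t (s + 1) jw).mp hjw with ⟨k, hk, rfl⟩
      have : ((s :: idxs).contains (s + 1 + (k : Int))) = (idxs.contains (s + 1 + (k : Int))) := by
        simp
        omega
      simp only [this]
    have hnotmem : ∀ idxs : List Int,
        idxs.Sublist (PySem.List.pyRange (s + 1) ((s + 1) + t.length) 1) →
          idxs.contains s = false := by
      intro idxs hsub
      by_contra hc
      have hct : idxs.contains s = true := by revert hc; cases idxs.contains s <;> simp
      have hmem : s ∈ idxs := by simpa using hct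
      have := PySem.List.mem_pyRange_one.mp (hsub.mem hmem)
      omega
    cases r with
    | zero =>
      rw [hcons, PySem.List.combinations_zero]
      simp only [List.map_cons, List.map_nil]
      rw [pvForms]
      simp only [gt_iff_lt, Nat.lt_irrefl, if_false, List.nil_append]
      rw [ih 0 (s + 1), PySem.List.combinations_zero]
      simp [PySem.List.enumerate_cons]
    | succ r' =>
      rw [hcons, PySem.List.combinations_cons_succ]
      rw [List.map_append, List.map_map]
      rw [pvForms]
      simp only [gt_iff_lt, Nat.succ_sub_one, Nat.zero_lt_succ, if_pos]
      congr 1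
      · rw [ih r' (s + 1), List.map_map]
        apply List.map_congr_left
        intro idxs hidxs
        have hsub := PySem.List.sublist_of_mem_combinations hidxs
        simp only [Function.comp]
        rw [PySem.List.enumerate_cons, List.map_cons]
        refine congrArg₂ _ ?_ (htail idxs hsub).symm
        simp
      · rw [ih (r' + 1) (s + 1), List.map_map]
        apply List.map_congr_left
        intro idxs hidxs
        have hsub := PySem.List.sublist_of_mem_combinations hidxs
        simp only [Function.comp]
        rw [PySem.List.enumerate_cons, List.map_cons]
        rw [hnotmem idxs hsub]
        simp

-- count of long words among the first k
def pvCntI (ws : List String) (k : Nat) : Int :=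
  ((ws.take k).countP (fun w => decide (1 < PySem.Str.len w)) : Int)

theorem pv_pref_gen (ws : List String) : ∀ (p : List Int) (a : Int),
    ws.foldl (fun p w =>
        p ++ [PySem.List.pyGetD p (-1) 0 + (if 1 < PySem.Str.len w then (1 : Int) else 0)]) (p ++ [a])
      = p ++ [a] ++ (List.range ws.length).map (fun k => a + pvCntI ws (k + 1)) := by
  induction ws with
  | nil => intro p a; simp
  | cons w t ih =>
    intro p a
    rw [List.foldl_cons, PySem.List.pyGetD_neg_one_append_singleton]
    rw [ih (p ++ [a]) (a + (if 1 < PySem.Str.len w then (1 : Int) else 0))]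
    rw [List.length_cons, List.range_succ_eq_map, List.map_cons, List.map_map]
    simp only [List.append_assoc, List.cons_append, List.nil_append]
    congr 1
    congr 1
    congr 1
    · show _ = a + pvCntI (w :: t) (0 + 1)
      simp only [pvCntI, Nat.zero_add, List.take_succ_cons, List.take_zero, List.countP_cons,
        List.countP_nil]
      split_ifs <;> simp_all <;> omega
    · apply List.map_congr_left
      intro k hk
      simp only [Function.comp]
      have : pvCntI (w :: t) (k + 1 + 1)
          = (if 1 < PySem.Str.len w then (1 : Int) else 0) + pvCntI t (k + 1) := by
        simp [pvCntI, List.countP_cons]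
        split_ifs <;> simp_all <;> push_cast <;> omega
      rw [this]; ring

theorem pv_pref_eq (ws : List String) :
    ws.foldl (fun p w =>
        p ++ [PySem.List.pyGetD p (-1) 0 + (if 1 < PySem.Str.len w then (1 : Int) else 0)]) [(0 : Int)]
      = (List.range (ws.length + 1)).map (fun k => pvCntI ws k) := by
  have := pv_pref_gen ws [] 0
  simp only [List.nil_append] at this
  rw [this, List.range_succ_eq_map, List.map_cons, List.map_map]
  simp [pvCntI, Function.comp]

-- the window of r words starting at s, as A reads it by indices
theorem pv_window_map (ws : List String) (s r : Int) (h0 : 0 ≤ s) (hr : 0 ≤ r)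
    (hn : s + r ≤ (ws.length : Int)) :
    (PySem.List.pyRange 0 r 1).map (fun i => PySem.List.pyGetD ws (s + i) "")
      = (ws.drop s.toNat).take r.toNat := by
  apply List.ext_getElem
  · simp [PySem.List.length_pyRange_one]
    omega
  · intro k h1 h2
    simp only [List.getElem_map, PySem.List.getElem_pyRange_one]
    rw [List.getElem_take, List.getElem_drop]
    have hlen : k < (PySem.List.pyRange 0 r 1).length := by simpa using h1
    rw [PySem.List.length_pyRange_one] at hlen
    rw [PySem.List.pyGetD_eq_getElem ws "" (by omega) (by push_cast; omega)]
    simp only [show ((s + (0 + (k : Int))).toNat) = s.toNat + k by omega]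

-- prefix-sum window test ⟺ every word of the window is long
theorem pv_cond_iff (ws : List String) (s r : Int) (h0 : 0 ≤ s) (hr : 0 ≤ r)
    (hn : s + r ≤ (ws.length : Int)) :
    (pvCntI ws (s + r).toNat - pvCntI ws s.toNat = r)
      ↔ ((ws.drop s.toNat).take r.toNat).all (fun w => decide (1 < PySem.Str.len w)) = true := by
  have hsplit : (s + r).toNat = s.toNat + r.toNat := by omega
  rw [hsplit]
  unfold pvCntI
  rw [List.take_add, List.countP_append]
  have hlen : ((ws.drop s.toNat).take r.toNat).length = r.toNat := by
    simp; omega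
  have hkey : ((ws.drop s.toNat).take r.toNat).countP (fun w => decide (1 < PySem.Str.len w))
      = ((ws.drop s.toNat).take r.toNat).length
      ↔ ((ws.drop s.toNat).take r.toNat).all (fun w => decide (1 < PySem.Str.len w)) = true := by
    rw [List.countP_eq_length, List.all_eq_true]
  rw [← hkey, hlen]
  have hle := List.countP_le_length (p := fun w => decide (1 < PySem.Str.len w))
    (l := (ws.drop s.toNat).take r.toNat)
  rw [hlen] at hle
  push_cast
  omega

theorem pv_join_singleton (sep x : String) : PySem.Str.join sep [x] = x := by
  rw [← String.toList_inj, PySem.Str.toList_join]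
  simp [PySem.Chars.join_singleton]

theorem pv_join_ne_empty (x : String) (l : List String) (hx : x.toList ≠ []) :
    PySem.Str.join "" (x :: l) ≠ "" := by
  intro h
  have h2 := congrArg String.toList h
  rw [PySem.Str.toList_join] at h2
  cases l with
  | nil =>
    rw [List.map_cons, List.map_nil, PySem.Chars.join_singleton] at h2
    exact hx (by simpa using h2)
  | cons y t =>
    rw [List.map_cons, List.map_cons, PySem.Chars.join_cons_cons] at h2
    simp at h2
    rcases h2 with ⟨rfl, -⟩
    simp at hx

-- the two loop bodies agree on any set already containing the variant
theorem pv_step_eq (s : PySem.Set String) (v : String) (hv : v ∈ s)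
    (hw : ∀ w ∈ (PySem.Str.split? v " ").getD [], w ≠ "") : pvStepA s v = pvStepB s v := by
  simp only [pvStepA, pvStepB]
  by_cases h1 : (pvSplitWords v).length = 1
  · obtain ⟨w, hsp⟩ := List.length_eq_one_iff.mp h1
    have hvw : v = w := pv_split_singleton v w hsp
    rw [hsp, hvw]
    simp only [List.length_cons, List.length_nil, Nat.zero_add, Nat.cast_one]
    have hws : w ∈ s := hvw ▸ hv
    simp only [show ((1:Nat) == 1) = true from rfl, if_true]
    rw [PySem.List.pyGetD_zero_cons, pv_set_add_mem hws]
    rw [show PySem.List.pyRange 0 (1 + 1) 1 = [0, 1] from by decide,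
        show PySem.List.pyRange 2 (1 + 1) 1 = [] from by decide]
    simp only [List.foldl_cons, List.foldl_nil, Int.toNat_zero, Int.toNat_one]
    simp only [pvForms, gt_iff_lt, Nat.lt_irrefl, if_false, Nat.zero_lt_one, if_true,
      List.map_cons, List.map_nil, List.nil_append, List.append_nil, List.foldl_cons,
      List.foldl_nil]
    rw [pv_join_singleton, pv_join_singleton]
    rw [pv_set_add_mem ((PySem.Set.mem_add _ _ _).mpr (Or.inl hws))]
  · have hw' : ∀ w ∈ pvSplitWords v, w ≠ "" := by
      intro w hmem
      exact hw w (by simpa [pvSplitWords] using hmem)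
    rw [if_neg (by simp [h1]), pv_set_add_mem hv]
    have hfirst : ∀ (r : Int) (acc : PySem.Set String),
        (PySem.List.combinations (PySem.List.pyRange 0 ((pvSplitWords v).length : Int) 1) r.toNat).foldl
          (fun nv full_indices => nv.add (PySem.Str.join " "
            ((PySem.List.enumerate (pvSplitWords v)).map
              (fun jw => if full_indices.contains jw.1 then jw.2 else pvAbbr jw.2)))) acc
        = (pvForms (pvSplitWords v) r.toNat).foldl
            (fun nv form => nv.add (PySem.Str.join " " form)) acc := by
      intro r acc
      rw [pvForms_eq (pvSplitWords v) r.toNat 0]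
      simp only [zero_add]
      rw [List.foldl_map]
    rw [PySem.List.foldl_congr_mem' _ _ _ _ (fun r _ acc => hfirst r acc)]
    apply PySem.List.foldl_congr_mem'
    intro r hr acc
    apply PySem.List.foldl_congr_mem'
    intro start hstart acc2
    rw [PySem.List.mem_pyRange_one] at hr hstart
    set ws := pvSplitWords v with hwsdef
    have hsr : start + r ≤ (ws.length : Int) := by omega
    have h0s : (0 : Int) ≤ start := hstart.1
    have h0r : (0 : Int) ≤ r := by omega
    rw [pv_pref_eq ws]
    have hlook : ∀ (i : Int), 0 ≤ i → i ≤ (ws.length : Int) →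
        PySem.List.pyGetD ((List.range (ws.length + 1)).map (fun k => pvCntI ws k)) i 0
          = pvCntI ws i.toNat := by
      intro i hi0 hi1
      rw [PySem.List.pyGetD_eq_getElem _ 0 hi0 (by simp; omega)]
      simp
    rw [hlook (start + r) (by omega) (by omega), hlook start (by omega) (by omega)]
    have hcond : ((pvCntI ws (start + r).toNat - pvCntI ws start.toNat) == r)
        = ((PySem.List.pyRange 0 r 1).all
            (fun i => decide (1 < PySem.Str.len (PySem.List.pyGetD ws (start + i) "")))) := by
      rw [Bool.eq_iff_iff, beq_iff_eq, pv_cond_iff ws start r h0s h0r hsr,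
        ← pv_window_map ws start r h0s h0r hsr, List.all_map]
      exact Iff.rfl
    rw [hcond]
    by_cases hc : ((PySem.List.pyRange 0 r 1).all
        (fun i => decide (1 < PySem.Str.len (PySem.List.pyGetD ws (start + i) "")))) = true
    · rw [if_pos hc, if_pos hc]
      have hmap : (PySem.List.pyRange 0 r 1).map (fun i => pvAbbr (PySem.List.pyGetD ws (start + i) ""))
          = ((ws.drop start.toNat).take r.toNat).map pvAbbr := by
        rw [← pv_window_map ws start r h0s h0r hsr, List.map_map]
        rfl
      have hslice : PySem.List.slice ws (some start) (some (start + r))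
          = (ws.drop start.toNat).take r.toNat := by
        rw [PySem.List.slice_toNat ws h0s (by omega)]
        congr 1
        omega
      obtain ⟨x, tl, hwin⟩ : ∃ x tl, (ws.drop start.toNat).take r.toNat = x :: tl := by
        have : ((ws.drop start.toNat).take r.toNat).length = r.toNat := by simp; omega
        cases hempty : (ws.drop start.toNat).take r.toNat with
        | nil => rw [hempty] at this; simp at this; omega
        | cons a b => exact ⟨a, b, rfl⟩
      have hne : PySem.Str.join "" (((ws.drop start.toNat).take r.toNat).map pvAbbr) ≠ "" := by
        rw [hwin, List.map_cons]
        apply pv_join_ne_empty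
        simp [pvAbbr]
      rw [hmap, hslice, if_pos hne]
      simp [String.append_assoc]
    · rw [if_neg hc, if_neg hc]

theorem pv_foldl_eq (l : List String) : ∀ (s : PySem.Set String), (∀ v ∈ l, v ∈ s) →
    (∀ v ∈ l, ∀ w ∈ (PySem.Str.split? v " ").getD [], w ≠ "") →
    l.foldl pvStepA s = l.foldl pvStepB s := by
  induction l with
  | nil => intro s _ _; rfl
  | cons v t ih =>
    intro s hmem hpre
    rw [List.foldl_cons, List.foldl_cons,
      pv_step_eq s v (hmem v (List.mem_cons_self)) (hpre v (List.mem_cons_self))]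
    exact ih _ (fun v' hv' => pv_mem_stepB _ _ _ (hmem v' (List.mem_cons_of_mem _ hv')))
      (fun v' hv' => hpre v' (List.mem_cons_of_mem _ hv'))

-- ===== VERDICT (by name: the statement is the Claim_ definition above) =====
theorem add_abbreviations_point_spec : Claim_equal_add_abbreviations_point := by
  intro name_variants _hdom hpre
  unfold Spec_add_abbreviations_point add_abbreviations_point add_abbreviations_point_alt
  exact pv_foldl_eq name_variants _
    (fun v hv => (PySem.Set.mem_ofList _ _).mpr hv) hpre
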